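-- pv_equiv track=rewrite | github.com/chess-uiuc/cars-analysis | src/python/carsfit-tools/plot_carsfit_csv.py | axis_labels_from_meta
-- ===== SOURCE A (Python) =====
-- from typing import Dict, List, Tuple, Optional
--
-- def axis_labels_from_meta(metas: List[Dict[str,str]]) -> Tuple[str, str, Optional[str]]:
--     # Try to get consensus labels; fall back gracefully
--     xlabel = next((m.get("xlabel") for m in metas if "xlabel" in m), "x")
--     ylabel = next((m.get("ylabel") for m in metas if "ylabel" in m), "y")
--     title  = next((m.get("title")  for m in metas if "title"  in m), None)
--     xlabel = xlabel.replace("cm-1",r"$\text{cm}^{-1}$")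
--     ylabel = ylabel.replace("SQRT(Intensity)",r"$\sqrt{I}$")
--     ylabel = ylabel.replace("Theoretical Susceptibility", r"$|\chi^{(3)}|_{\mathrm{theory}}$")
--     return xlabel, ylabel, title
-- ===== SOURCE B (Python) =====
-- def axis_labels_from_meta(metas):
--     # One pass over metas with found-flags and early break, instead of three scans.
--     fx = fy = ft = False
--     vx = vy = vt = None
--     for m in metas:
--         if not fx and "xlabel" in m:
--             vx, fx = m["xlabel"], True
--         if not fy and "ylabel" in m:
--             vy, fy = m["ylabel"], True
--         if not ft and "title" in m:
--             vt, ft = m["title"], True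
--         if fx and fy and ft:
--             break
--     xlabel = vx if fx else "x"
--     ylabel = vy if fy else "y"
--     title = vt if ft else None
--     xlabel = xlabel.replace("cm-1", r"$\text{cm}^{-1}$")
--     ylabel = ylabel.replace("SQRT(Intensity)", r"$\sqrt{I}$")
--     ylabel = ylabel.replace("Theoretical Susceptibility", r"$|\chi^{(3)}|_{\mathrm{theory}}$")
--     return xlabel, ylabel, title
-- ===== Notes on version B (the rewrite author's own statement) =====
-- stated objective: alternative
-- what changed: Replaces A's three separate short-circuiting generator scans over metas with a single loop that maintains found-flags and captured values for xlabel/ylabel/title and breaks early once all three are found.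
import Mathlib
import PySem

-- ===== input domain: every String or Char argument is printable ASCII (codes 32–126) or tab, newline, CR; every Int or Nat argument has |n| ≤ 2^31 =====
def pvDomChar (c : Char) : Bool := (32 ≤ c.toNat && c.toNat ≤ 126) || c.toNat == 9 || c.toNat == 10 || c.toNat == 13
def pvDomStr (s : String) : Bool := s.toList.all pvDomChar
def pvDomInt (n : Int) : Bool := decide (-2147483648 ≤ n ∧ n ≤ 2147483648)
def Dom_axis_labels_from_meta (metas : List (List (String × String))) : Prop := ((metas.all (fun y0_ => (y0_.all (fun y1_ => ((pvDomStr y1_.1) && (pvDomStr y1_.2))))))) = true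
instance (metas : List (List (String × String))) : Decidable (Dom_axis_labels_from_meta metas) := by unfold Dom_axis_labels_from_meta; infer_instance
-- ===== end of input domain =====

-- ===== PORT A =====
-- B changes: one pass with found-flags and early break instead of A's three separate first-match scans (alternative decomposition, same cost).
-- first dict in metas that contains the key, yielding its value (port of next((m.get(k) for m in metas if k in m), default))
def pvScanKey (key : String) : List (List (String × String)) → Option String
  | [] => none
  | m :: rest =>
    match m.lookup key with
    | some v => some v
    | none => pvScanKey key rest

def axis_labels_from_meta (metas : List (List (String × String))) : String × String × Option String :=
  let xlabel := (pvScanKey "xlabel" metas).getD "x"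
  let ylabel := (pvScanKey "ylabel" metas).getD "y"
  let title := pvScanKey "title" metas
  let xlabel := PySem.Str.replace xlabel "cm-1" "$\\text{cm}^{-1}$"
  let ylabel := PySem.Str.replace ylabel "SQRT(Intensity)" "$\\sqrt{I}$"
  let ylabel := PySem.Str.replace ylabel "Theoretical Susceptibility" "$|\\chi^{(3)}|_{\\mathrm{theory}}$"
  (xlabel, ylabel, title)

-- ===== PORT B =====
-- the single loop of Source B: Option none = flag unset; capture on first sight; break once all three captured
def pvAltLoop : List (List (String × String)) → Option String → Option String → Option String → Option String × Option String × Option String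
  | [], vx, vy, vt => (vx, vy, vt)
  | m :: rest, vx, vy, vt =>
    let vx := if vx.isNone then m.lookup "xlabel" else vx
    let vy := if vy.isNone then m.lookup "ylabel" else vy
    let vt := if vt.isNone then m.lookup "title" else vt
    if vx.isSome && vy.isSome && vt.isSome then (vx, vy, vt)
    else pvAltLoop rest vx vy vt

def axis_labels_from_meta_alt (metas : List (List (String × String))) : String × String × Option String :=
  let (vx, vy, vt) := pvAltLoop metas none none none
  let xlabel := PySem.Str.replace (vx.getD "x") "cm-1" "$\\text{cm}^{-1}$"
  let ylabel := PySem.Str.replace (PySem.Str.replace (vy.getD "y") "SQRT(Intensity)" "$\\sqrt{I}$") "Theoretical Susceptibility" "$|\\chi^{(3)}|_{\\mathrm{theory}}$"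
  (xlabel, ylabel, vt)

-- ===== PRECONDITION & SPEC =====
def Spec_axis_labels_from_meta (metas : List (List (String × String))) (out : String × String × Option String) : Prop := out = axis_labels_from_meta_alt metas
instance (metas : List (List (String × String))) (out : String × String × Option String) : Decidable (Spec_axis_labels_from_meta metas out) := by unfold Spec_axis_labels_from_meta; infer_instance

-- ===== CLAIM (what is proved, stated in full; the proofs are below) =====
def Claim_equal_axis_labels_from_meta : Prop := ∀ (metas : List (List (String × String))), Dom_axis_labels_from_meta metas → Spec_axis_labels_from_meta metas (axis_labels_from_meta metas)

-- ===== LEMMAS AND PROOFS =====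
theorem pvAltLoop_eq (metas : List (List (String × String))) :
    ∀ vx vy vt, pvAltLoop metas vx vy vt =
      (vx.or (pvScanKey "xlabel" metas), vy.or (pvScanKey "ylabel" metas), vt.or (pvScanKey "title" metas)) := by
  induction metas with
  | nil => intro vx vy vt; simp [pvAltLoop, pvScanKey]
  | cons m rest ih =>
    intro vx vy vt
    cases vx <;> cases vy <;> cases vt <;>
      cases hx : m.lookup "xlabel" <;> cases hy : m.lookup "ylabel" <;> cases ht : m.lookup "title" <;>
        simp [pvAltLoop, pvScanKey, ih, hx, hy, ht]

-- ===== VERDICT (by name: the statement is the Claim_ definition above) =====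
theorem axis_labels_from_meta_spec : Claim_equal_axis_labels_from_meta := by
  intro metas _
  unfold Spec_axis_labels_from_meta axis_labels_from_meta axis_labels_from_meta_alt
  rw [pvAltLoop_eq]
  simp
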